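-- pv_equiv track=rewrite | github.com/fiy2W/BUS-GAN | utils.py | select_max
-- ===== SOURCE A (Python) =====
-- def select_max(contours):
--     con_i = -1
--     max_con = 0
--     for i, contour in enumerate(contours):
--         if max_con < len(contour):
--             max_con = len(contour)
--             con_i = i
--     if con_i == -1:
--         return []
--     else:
--         return [con_i]
-- ===== SOURCE B (Python) =====
-- def select_max(contours):
--     lengths = [len(c) for c in contours]
--     if not lengths:
--         return []
--     m = max(lengths)
--     if m == 0:
--         return []
--     return [lengths.index(m)]
-- ===== Notes on version B (the rewrite author's own statement) =====
-- stated objective: simpler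
-- what changed: B computes the list of lengths first, then uses max() and list.index() to find the first maximum, instead of tracking a running maximum and its index in a manual enumerate loop.
import Mathlib
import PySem

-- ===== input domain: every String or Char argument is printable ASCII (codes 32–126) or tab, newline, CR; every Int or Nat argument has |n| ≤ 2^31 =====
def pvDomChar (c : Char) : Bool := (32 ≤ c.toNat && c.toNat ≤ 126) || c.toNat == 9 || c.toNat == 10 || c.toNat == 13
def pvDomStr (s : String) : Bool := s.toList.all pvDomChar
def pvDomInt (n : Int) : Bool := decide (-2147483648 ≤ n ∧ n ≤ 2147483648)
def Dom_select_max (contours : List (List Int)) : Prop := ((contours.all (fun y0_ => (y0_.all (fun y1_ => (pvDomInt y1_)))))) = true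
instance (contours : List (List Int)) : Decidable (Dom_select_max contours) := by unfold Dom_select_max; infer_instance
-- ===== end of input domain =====

-- B replaces A's manual running-max/index loop by lengths-list + max() + first index() (objective: simpler).

-- ===== PORT A =====
def select_max (contours : List (List Int)) : List Int :=
  let st := (PySem.List.enumerate contours 0).foldl
    (fun (s : Int × Int) p =>
      if s.2 < (p.2.length : Int) then (p.1, (p.2.length : Int)) else s) (-1, 0)
  if st.1 = -1 then [] else [st.1]

-- ===== PORT B =====
def select_max_alt (contours : List (List Int)) : List Int :=
  let lengths := contours.map (fun c => (c.length : Int))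
  match PySem.List.max? lengths (fun y => y) with
  | none => []
  | some m =>
    if m = 0 then []
    else
      match PySem.List.index? lengths m with
      | none => []   -- unreachable: m ∈ lengths
      | some i => [(i : Int)]

-- ===== PRECONDITION & SPEC =====
def Spec_select_max (contours : List (List Int)) (out : List Int) : Prop := out = select_max_alt contours
instance (contours : List (List Int)) (out : List Int) : Decidable (Spec_select_max contours out) := by unfold Spec_select_max; infer_instance

-- ===== CLAIM (what is proved, stated in full; the proofs are below) =====
def Claim_equal_select_max : Prop := ∀ (contours : List (List Int)), Dom_select_max contours → Spec_select_max contours (select_max contours)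

-- ===== LEMMAS AND PROOFS =====

-- A's loop, abstracted over the list of lengths (proof helper only).
def specLoop : List Int → Int → Int → Int → Int × Int
  | [], _, ci, mc => (ci, mc)
  | l :: t, k, ci, mc => if mc < l then specLoop t (k + 1) k l else specLoop t (k + 1) ci mc

theorem foldA_eq_specLoop (xs : List (List Int)) : ∀ (k ci mc : Int),
    (PySem.List.enumerate xs k).foldl
      (fun (s : Int × Int) p =>
        if s.2 < (p.2.length : Int) then (p.1, (p.2.length : Int)) else s) (ci, mc)
      = specLoop (xs.map fun c => (c.length : Int)) k ci mc := by
  induction xs with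
  | nil => intro k ci mc; simp [PySem.List.enumerate_nil, specLoop]
  | cons c t ih =>
    intro k ci mc
    simp only [PySem.List.enumerate_cons, List.foldl_cons, List.map_cons, specLoop]
    by_cases h : mc < (c.length : Int) <;> simp [h, ih]

theorem specLoop_le (ls : List Int) : ∀ (k ci mc : Int), (∀ l ∈ ls, l ≤ mc) →
    specLoop ls k ci mc = (ci, mc) := by
  induction ls with
  | nil => intro k ci mc _; rfl
  | cons l t ih =>
    intro k ci mc h
    have hl : l ≤ mc := h l (by simp)
    simp only [specLoop, if_neg (not_lt.mpr hl)]
    exact ih _ _ _ (fun x hx => h x (by simp [hx]))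

theorem max?_tail {l : Int} {t : List Int} {M : Int}
    (hmax : PySem.List.max? (l :: t) (fun y => y) = some M) (hne : l ≠ M) :
    PySem.List.max? t (fun y => y) = some M := by
  have hmem : M ∈ l :: t := PySem.List.max?_mem hmax
  have hMt : M ∈ t := by
    rcases List.mem_cons.mp hmem with h | h
    · exact absurd h.symm hne
    · exact h
  have hne' : t ≠ [] := by rintro rfl; simp at hMt
  rcases hM' : PySem.List.max? t (fun y => y) with _ | M'
  · exact absurd ((PySem.List.max?_eq_none_iff _ _).mp hM') hne'
  · have h1 : M' ≤ M := PySem.List.max?_isMax hmax M' (by simp [PySem.List.max?_mem hM'])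
    have h2 : M ≤ M' := PySem.List.max?_isMax hM' M hMt
    rw [le_antisymm h1 h2]

theorem specLoop_gt (ls : List Int) : ∀ (M : Int) (j : Nat) (k ci mc : Int),
    PySem.List.max? ls (fun y => y) = some M →
    PySem.List.index? ls M = some j → mc < M →
    specLoop ls k ci mc = (k + (j : Int), M) := by
  induction ls with
  | nil => intro M j k ci mc hmax _ _; simp [PySem.List.max?] at hmax
  | cons l t ih =>
    intro M j k ci mc hmax hidx hmc
    have hlM : l ≤ M := PySem.List.max?_isMax hmax l (by simp)
    by_cases hl : l = M
    · subst hl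
      have hj : j = 0 := by
        rw [PySem.List.index?_cons_self] at hidx
        injection hidx with h
        exact h.symm
      subst hj
      simp only [specLoop, if_pos hmc]
      have hall : ∀ x ∈ t, x ≤ l := fun x hx =>
        PySem.List.max?_isMax hmax x (by simp [hx])
      rw [specLoop_le t _ _ _ hall]
      simp
    · have hmax' : PySem.List.max? t (fun y => y) = some M := max?_tail hmax hl
      have hlt : l < M := lt_of_le_of_ne hlM hl
      rw [PySem.List.index?_cons_of_ne t hl] at hidx
      rcases hj' : PySem.List.index? t M with _ | j'
      · rw [hj'] at hidx; simp at hidx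
      · rw [hj'] at hidx
        simp only [Option.map_some] at hidx
        have hj : j = j' + 1 := by injection hidx with h; omega
        subst hj
        simp only [specLoop]
        by_cases hmcl : mc < l
        · rw [if_pos hmcl, ih M j' (k + 1) k l hmax' hj' hlt]
          congr 1
          push_cast
          ring
        · rw [if_neg hmcl, ih M j' (k + 1) ci mc hmax' hj' hmc]
          congr 1
          push_cast
          ring

-- ===== VERDICT (by name: the statement is the Claim_ definition above) =====
theorem select_max_spec : Claim_equal_select_max := by
  intro cs _
  unfold Spec_select_max select_max select_max_alt
  simp only []
  rw [foldA_eq_specLoop]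
  set ls := cs.map (fun c => (c.length : Int)) with hls
  have hnn : ∀ l ∈ ls, 0 ≤ l := by
    intro l hl
    rcases List.mem_map.mp hl with ⟨c, _, rfl⟩
    exact Int.natCast_nonneg _
  rcases hmax : PySem.List.max? ls (fun y => y) with _ | M
  · have : ls = [] := (PySem.List.max?_eq_none_iff _ _).mp hmax
    rw [this]; simp [specLoop]
  · have hMnn : 0 ≤ M := hnn M (PySem.List.max?_mem hmax)
    by_cases hM0 : M = 0
    · subst hM0
      have hall : ∀ l ∈ ls, l ≤ 0 := fun l hl => PySem.List.max?_isMax hmax l hl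
      rw [specLoop_le ls _ _ _ hall]
      simp
    · have hMpos : 0 < M := lt_of_le_of_ne hMnn (Ne.symm hM0)
      have hsome : (PySem.List.index? ls M).isSome :=
        (PySem.List.index?_isSome_iff _ _).mpr (PySem.List.max?_mem hmax)
      rcases hidx : PySem.List.index? ls M with _ | j
      · rw [hidx] at hsome; simp at hsome
      · rw [specLoop_gt ls M j 0 (-1) 0 hmax hidx hMpos]
        rw [PySem.List.index?_eq_idxOf?] at hidx
        simp [hidx, hM0]
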